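-- pv_equiv track=rewrite | github.com/COVID19Tracking/covid19-datafetcher | utils.py | csv_sum
-- ===== SOURCE A (Python) =====
-- def csv_sum(data, columns=None):
--     '''Expecting Dict CSV: list of dicts-like objects
--     What about dates/cells that cannot be summed?
--     Use columns hint
--     TODO: heuristic to decide whether a column is numeric for summation
--
--     returns dictionary of sums
--     '''
--     if columns is None or not columns:
--         return {}
--
--     sums = {x: 0 for x in columns}
--     for row in data:
--         for k, v in row.items():
--             if k in sums:
--                 sums[k] += v if isinstance(v, int) else int(v.replace(',', ''))
--     return sums
-- ===== SOURCE B (Python) =====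
-- def csv_sum(data, columns=None):
--     if not columns:
--         return {}
--     cols = list(dict.fromkeys(columns))
--     return dict((c, sum((v if isinstance(v, int) else int(v.replace(',', '')))
--                         for row in data if c in row for v in [row[c]]))
--                 for c in cols)
-- ===== Notes on version B (the rewrite author's own statement) =====
-- stated objective: alternative
-- what changed: Replaced A's row-major pass that mutates a pre-zeroed sums dict via a per-cell membership test with a column-outer construction: dedup the requested columns once and build the result dict directly from (column, sum over the rows' lookups) pairs, with no mutable accumulator dict.
import Mathlib
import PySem

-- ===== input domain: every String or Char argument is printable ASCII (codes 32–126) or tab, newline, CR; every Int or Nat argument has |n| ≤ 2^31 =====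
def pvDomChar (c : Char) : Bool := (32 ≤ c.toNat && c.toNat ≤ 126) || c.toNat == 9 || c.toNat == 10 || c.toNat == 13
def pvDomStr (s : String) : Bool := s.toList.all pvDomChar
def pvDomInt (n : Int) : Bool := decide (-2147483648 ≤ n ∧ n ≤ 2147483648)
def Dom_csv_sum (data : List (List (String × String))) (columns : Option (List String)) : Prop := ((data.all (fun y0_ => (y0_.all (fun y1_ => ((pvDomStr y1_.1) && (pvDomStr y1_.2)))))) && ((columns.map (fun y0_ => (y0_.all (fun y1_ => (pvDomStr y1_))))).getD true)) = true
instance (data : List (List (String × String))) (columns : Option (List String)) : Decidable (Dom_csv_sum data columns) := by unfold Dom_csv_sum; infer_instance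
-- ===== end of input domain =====

-- B builds the result column-outer: dedup the requested columns, then one pair
-- (c, sum of that column's parsed lookups over the rows) per column, assembled by dict();
-- A makes a row-major pass mutating a pre-zeroed sums dict. Same cost class, no speed claim.
-- int(v.replace(',', '')), shared verbatim by both Pythons; Pre_ excludes failing parses,
-- so the .getD 0 branch is never reached on admitted inputs.
def pvParse (v : String) : Int := (PySem.Int.ofStr? (PySem.Str.replace v "," "")).getD 0

-- ===== PORT A =====
-- rows are dicts at the Python level; values are String on this typed domain, so
-- `isinstance(v, int)` is always False and only the parsing branch is ported.
def csv_sum (data : List (List (String × String))) (columns : Option (List String)) : List (String × Int) :=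
  match columns with
  | none => []
  | some cols =>
    if cols = [] then []
    else
      let sums0 : PySem.Dict String Int := cols.foldl (fun d x => d.insert x 0) PySem.Dict.empty
      let sums := data.foldl (fun d row =>
        row.foldl (fun d kv =>
          if d.contains kv.1 then d.insert kv.1 (d.getD kv.1 0 + pvParse kv.2) else d) d) sums0
      sums.items

-- ===== PORT B =====
-- `list(dict.fromkeys(columns))` = PySem.List.dedup; `sum(parse(row[c]) for row in data if c in row)`
-- = sum of the parses of the successful lookups (List.filterMap lookup); `dict(pairs)` = Dict.ofList.
def csv_sum_alt (data : List (List (String × String))) (columns : Option (List String)) : List (String × Int) :=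
  if (columns.getD []).isEmpty then []
  else
    (PySem.Dict.ofList ((PySem.List.dedup (columns.getD [])).map (fun c =>
      (c, ((data.filterMap (fun row => List.lookup c row)).map pvParse).sum)))).items

-- ===== PRECONDITION & SPEC =====
-- Pre_ excludes (1) inputs where Python A raises ValueError: a value in a requested column
-- that int(v.replace(',','')) cannot parse; (2) rows whose association list repeats a key,
-- which cannot arise from a Python dict (the dict representation is ambiguous there).
def Pre_csv_sum (data : List (List (String × String))) (columns : Option (List String)) : Prop :=
  (∀ row ∈ data, (row.map Prod.fst).Nodup) ∧
  (∀ row ∈ data, ∀ p ∈ row, p.1 ∈ columns.getD [] →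
    (PySem.Int.ofStr? (PySem.Str.replace p.2 "," "")).isSome = true)
instance (data : List (List (String × String))) (columns : Option (List String)) : Decidable (Pre_csv_sum data columns) := by unfold Pre_csv_sum; infer_instance

def pvWitness_csv_sum : (List (List (String × String))) × Option (List String) :=
  ([[("a", "1,000"), ("b", "x")], [("a", "-2")]], some ["a"])

def Spec_csv_sum (data : List (List (String × String))) (columns : Option (List String)) (out : List (String × Int)) : Prop := out = csv_sum_alt data columns
instance (data : List (List (String × String))) (columns : Option (List String)) (out : List (String × Int)) : Decidable (Spec_csv_sum data columns out) := by unfold Spec_csv_sum; infer_instance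

-- ===== CLAIM (what is proved, stated in full; the proofs are below) =====
def Claim_equal_csv_sum : Prop := ∀ (data : List (List (String × String))) (columns : Option (List String)), Dom_csv_sum data columns → Pre_csv_sum data columns → Spec_csv_sum data columns (csv_sum data columns)

-- ===== LEMMAS AND PROOFS =====

-- sum of the parses of ALL cells of `row` in column k (A's per-row contribution)
def rowFilterSum (row : List (String × String)) (k : String) : Int :=
  ((row.filter (fun p => p.1 == k)).map (fun p => pvParse p.2)).sum

def aTotal (data : List (List (String × String))) (k : String) : Int :=
  (data.map (fun row => rowFilterSum row k)).sum

theorem get?_foldl_insert_const (f : String → Int) (cols : List String)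
    (d : PySem.Dict String Int) (k : String) :
    (cols.foldl (fun d c => d.insert c (f c)) d).get? k =
      if k ∈ cols then some (f k) else d.get? k := by
  induction cols generalizing d with
  | nil => simp
  | cons c rest ih =>
    simp only [List.foldl_cons, ih, PySem.Dict.get?_insert, List.mem_cons]
    by_cases hr : k ∈ rest <;> by_cases hc : k = c <;> simp [hr, hc]

theorem row_fold_spec (row : List (String × String)) (d : PySem.Dict String Int) :
    (row.foldl (fun d kv =>
        if d.contains kv.1 then d.insert kv.1 (d.getD kv.1 0 + pvParse kv.2) else d) d).keys = d.keys ∧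
    ∀ k, (row.foldl (fun d kv =>
        if d.contains kv.1 then d.insert kv.1 (d.getD kv.1 0 + pvParse kv.2) else d) d).getD k 0 =
      d.getD k 0 + (if d.contains k then rowFilterSum row k else 0) := by
  induction row generalizing d with
  | nil => simp [rowFilterSum]
  | cons a rest ih =>
    by_cases ha : d.contains a.1
    · have hk := PySem.Dict.keys_insert_of_contains (d := d) (k := a.1)
        (v := d.getD a.1 0 + pvParse a.2) ha
      obtain ⟨ihk, ihv⟩ := ih (d.insert a.1 (d.getD a.1 0 + pvParse a.2))
      refine ⟨by simpa [ha, hk] using ihk, ?_⟩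
      intro k
      simp only [List.foldl_cons, ha, if_true]
      rw [ihv k]
      have hcont : (d.insert a.1 (d.getD a.1 0 + pvParse a.2)).contains k = d.contains k := by
        rw [PySem.Dict.contains_eq_decide_mem_keys, PySem.Dict.contains_eq_decide_mem_keys, hk]
      rw [hcont, PySem.Dict.getD_insert]
      by_cases hk1 : k = a.1
      · subst hk1
        simp [ha, rowFilterSum]
        ring
      · simp [hk1, rowFilterSum, Ne.symm hk1]
    · obtain ⟨ihk, ihv⟩ := ih d
      refine ⟨by simpa [ha] using ihk, ?_⟩
      intro k
      have ha' : d.contains a.1 = false := by simpa using ha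
      simp only [List.foldl_cons, ha', Bool.false_eq_true, if_false]
      rw [ihv k]
      by_cases hk1 : k = a.1
      · subst hk1; simp [ha']
      · simp [rowFilterSum, Ne.symm hk1]

theorem data_fold_spec (data : List (List (String × String))) (d : PySem.Dict String Int) :
    (data.foldl (fun d row => row.foldl (fun d kv =>
        if d.contains kv.1 then d.insert kv.1 (d.getD kv.1 0 + pvParse kv.2) else d) d) d).keys = d.keys ∧
    ∀ k, (data.foldl (fun d row => row.foldl (fun d kv =>
        if d.contains kv.1 then d.insert kv.1 (d.getD kv.1 0 + pvParse kv.2) else d) d) d).getD k 0 =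
      d.getD k 0 + (if d.contains k then aTotal data k else 0) := by
  induction data generalizing d with
  | nil => simp [aTotal]
  | cons row rest ih =>
    obtain ⟨rk, rv⟩ := row_fold_spec row d
    obtain ⟨ihk, ihv⟩ := ih (row.foldl (fun d kv =>
        if d.contains kv.1 then d.insert kv.1 (d.getD kv.1 0 + pvParse kv.2) else d) d)
    refine ⟨by simpa [rk] using ihk, ?_⟩
    intro k
    simp only [List.foldl_cons]
    rw [ihv k, rv k]
    have hcont : (row.foldl (fun d kv =>
        if d.contains kv.1 then d.insert kv.1 (d.getD kv.1 0 + pvParse kv.2) else d) d).contains k = d.contains k := by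
      rw [PySem.Dict.contains_eq_decide_mem_keys, PySem.Dict.contains_eq_decide_mem_keys, rk]
    rw [hcont]
    simp only [aTotal, List.map_cons, List.sum_cons]
    split_ifs <;> ring

theorem lookup_eq_filter (row : List (String × String)) (k : String)
    (h : (row.map Prod.fst).Nodup) :
    rowFilterSum row k = (match List.lookup k row with
      | some v => pvParse v
      | none => 0) := by
  induction row with
  | nil => simp [rowFilterSum]
  | cons a rest ih =>
    simp only [List.map_cons, List.nodup_cons] at h
    obtain ⟨hnotin, hnd⟩ := h
    by_cases hk1 : a.1 = k
    · subst hk1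
      have hfil : rest.filter (fun p => p.1 == a.1) = [] := by
        rw [List.filter_eq_nil_iff]
        intro p hp
        simp only [beq_iff_eq]
        intro hpk
        exact hnotin (hpk ▸ List.mem_map_of_mem hp)
      simp [rowFilterSum, List.lookup, hfil]
    · have := ih hnd
      simp only [rowFilterSum, List.filter_cons] at this ⊢
      have hbeq : (a.1 == k) = false := by simpa using hk1
      simp only [hbeq, Bool.false_eq_true, if_false] at *
      rw [this]
      have : List.lookup k (a :: rest) = List.lookup k rest := by
        rcases a with ⟨a1, a2⟩
        simp only [List.lookup]
        have : (k == a1) = false := by simpa using fun h => hk1 h.symm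
        simp [this]
      rw [this]

-- B's inner generator sum equals A's per-column total, given dict-shaped rows
theorem b_sum_eq (data : List (List (String × String))) (k : String)
    (h : ∀ row ∈ data, (row.map Prod.fst).Nodup) :
    ((data.filterMap (fun row => List.lookup k row)).map pvParse).sum = aTotal data k := by
  induction data with
  | nil => simp [aTotal]
  | cons row rest ih =>
    have hrest : ∀ r ∈ rest, (r.map Prod.fst).Nodup := fun r hr => h r (by simp [hr])
    have hrow := lookup_eq_filter row k (h row (by simp))
    simp only [aTotal, List.map_cons, List.sum_cons, List.filterMap_cons]
    rcases hl : List.lookup k row with _ | v <;> rw [hl] at hrow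
    · rw [ih hrest]
      simp only [aTotal]
      rw [hrow]; ring
    · simp only [List.map_cons, List.sum_cons]
      rw [ih hrest]
      simp only [aTotal]
      rw [hrow]

-- dict(pairs) with pairwise-distinct keys: the items ARE the pairs
theorem items_ofList_of_nodup {ν : Type} (l : List (String × ν))
    (h : (l.map Prod.fst).Nodup) : (PySem.Dict.ofList l).items = l := by
  have : PySem.Dict.ofList l = l.foldl (fun d a => d.insert a.1 a.2) PySem.Dict.empty := by
    rfl
  rw [this]
  have := PySem.Dict.items_foldl_insert_fresh (l := l) (k := Prod.fst) (v := Prod.snd)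
    (d := PySem.Dict.empty) (by intro a _; simp) h
  simpa using this

-- ===== VERDICT (by name: the statement is the Claim_ definition above) =====
theorem csv_sum_spec : Claim_equal_csv_sum := by
  intro data columns _hdom hpre
  obtain ⟨hnd, _⟩ := hpre
  unfold Spec_csv_sum csv_sum csv_sum_alt
  cases columns with
  | none => rfl
  | some cols =>
    by_cases hc : cols = []
    · simp [hc]
    · have hce : cols.isEmpty = false := by simp [hc]
      simp only [hc, if_false, Option.getD_some, hce, Bool.false_eq_true]
      -- B side: items of dict(pairs over dedup cols) are exactly the pairs
      rw [items_ofList_of_nodup _ (by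
        rw [List.map_map]
        simp [Function.comp_def, PySem.Set.nodup_ofList])]
      -- A side dict
      set sums0 : PySem.Dict String Int := cols.foldl (fun d x => d.insert x 0) PySem.Dict.empty with hs0
      obtain ⟨hAk, hAv⟩ := data_fold_spec data sums0
      have hs0keys : sums0.keys = PySem.Set.ofList cols := by
        rw [hs0, PySem.Dict.keys_foldl_insert]
        simp [PySem.Set.update_nil_left]
      have hs0get : ∀ k, sums0.get? k = if k ∈ cols then some 0 else none := by
        intro k
        rw [hs0]
        simpa using get?_foldl_insert_const (fun _ => 0) cols PySem.Dict.empty k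
      have hndA : (data.foldl (fun d row => row.foldl (fun d kv =>
          if d.contains kv.1 then d.insert kv.1 (d.getD kv.1 0 + pvParse kv.2) else d) d) sums0).keys.Nodup := by
        rw [hAk, hs0keys]; exact PySem.Set.nodup_ofList cols
      rw [PySem.Dict.items_eq_map_keys _ hndA 0, hAk, hs0keys,
        PySem.List.dedup_eq_ofList]
      apply List.map_congr_left
      intro k hkmem
      have hkcols : k ∈ cols := (PySem.Set.mem_ofList cols k).1 hkmem
      have hcontA : sums0.contains k = true := by
        rw [PySem.Dict.contains_eq_isSome_get?, hs0get k]
        simp [hkcols]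
      have hgA : sums0.getD k 0 = 0 := by
        rw [PySem.Dict.getD_eq_get?_getD, hs0get k]
        simp [hkcols]
      have hleft : (data.foldl (fun d row => row.foldl (fun d kv =>
          if d.contains kv.1 then d.insert kv.1 (d.getD kv.1 0 + pvParse kv.2) else d) d) sums0).getD k 0 =
          aTotal data k := by
        rw [hAv k, hcontA, hgA]; simp
      rw [hleft, b_sum_eq data k hnd]
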